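-- pv_equiv track=rewrite | github.com/ZhymabekRoman/obsidian-enhanced-anotations | mkdocs-annotations/mkdocs_annotations/plugin.py | create_annotation_html
-- ===== SOURCE A (Python) =====
-- def create_annotation_html(text, annotations):
--     # Escape the annotations for HTML attribute
--     escaped_annotations = [
--         annotation.replace('"', "&quot;").replace("'", "&apos;")
--         for annotation in annotations
--     ]
--
--     # Create data attribute with annotations
--     data_annotations = "|".join(escaped_annotations)
--
--     container = f'<span class="annotation-container" data-annotations="{data_annotations}">{text}</span>'
--     return container
-- ===== SOURCE B (Python) =====
-- def create_annotation_html(text, annotations):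
--     # Single streaming pass: emit the result piece by piece into an accumulator,
--     # escaping character by character, instead of staged whole-string replace/join passes.
--     out = ['<span class="annotation-container" data-annotations="']
--     first = True
--     for annotation in annotations:
--         if not first:
--             out.append('|')
--         first = False
--         for ch in annotation:
--             if ch == '"':
--                 out.append('&quot;')
--             elif ch == "'":
--                 out.append('&apos;')
--             else:
--                 out.append(ch)
--     out.append('">')
--     out.append(text)
--     out.append('</span>')
--     return ''.join(out)
-- ===== Notes on version B (the rewrite author's own statement) =====
-- stated objective: alternative
-- what changed: B replaces A's staged passes (per-element whole-string replace calls, then join, then f-string) by one streaming character-level loop with an accumulator that emits the separator and the escape entity or plain character as it goes.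
import Mathlib
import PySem

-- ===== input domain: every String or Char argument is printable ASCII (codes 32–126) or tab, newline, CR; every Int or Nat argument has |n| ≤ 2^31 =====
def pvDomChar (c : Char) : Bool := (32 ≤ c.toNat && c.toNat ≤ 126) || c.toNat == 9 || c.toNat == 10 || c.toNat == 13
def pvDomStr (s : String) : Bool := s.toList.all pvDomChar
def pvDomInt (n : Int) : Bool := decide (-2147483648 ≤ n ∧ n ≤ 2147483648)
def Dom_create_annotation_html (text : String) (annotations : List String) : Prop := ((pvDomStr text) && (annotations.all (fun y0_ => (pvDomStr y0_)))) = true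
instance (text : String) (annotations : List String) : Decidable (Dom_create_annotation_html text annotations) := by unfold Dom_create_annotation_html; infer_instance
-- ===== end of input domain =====

-- B builds the span in one streaming character-level pass with an accumulator
-- (separator and escape entities emitted on the fly), instead of A's staged
-- per-element replace passes followed by a join (objective: alternative).


-- ===== PORT A =====
-- escape each annotation, then join with '|', then build the span
def create_annotation_html (text : String) (annotations : List String) : String :=
  let escaped_annotations :=
    annotations.map (fun annotation =>
      PySem.Str.replace (PySem.Str.replace annotation "\"" "&quot;") "'" "&apos;")
  let data_annotations := PySem.Str.join "|" escaped_annotations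
  "<span class=\"annotation-container\" data-annotations=\"" ++ data_annotations ++ "\">" ++ text ++ "</span>"

-- ===== PORT B =====
-- inner loop of Source B: emit each character (or its escape entity) into the accumulator
def pvEmitChars : List Char → List Char
  | [] => []
  | ch :: rest =>
    (if ch = '"' then "&quot;".toList
     else if ch = '\'' then "&apos;".toList
     else [ch]) ++ pvEmitChars rest

-- outer loop of Source B: emit '|' before every annotation except the first
def pvEmitAnns (first : Bool) : List String → List Char
  | [] => []
  | a :: rest =>
    (if !first then ['|'] else []) ++ pvEmitChars a.toList ++ pvEmitAnns false rest

-- one streaming pass, then one final concatenation (''.join in Source B)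
def create_annotation_html_alt (text : String) (annotations : List String) : String :=
  "<span class=\"annotation-container\" data-annotations=\""
    ++ String.ofList (pvEmitAnns true annotations)
    ++ "\">" ++ text ++ "</span>"

-- ===== PRECONDITION & SPEC =====
def Spec_create_annotation_html (text : String) (annotations : List String) (out : String) : Prop := out = create_annotation_html_alt text annotations
instance (text : String) (annotations : List String) (out : String) : Decidable (Spec_create_annotation_html text annotations out) := by unfold Spec_create_annotation_html; infer_instance

-- ===== CLAIM (what is proved, stated in full; the proofs are below) =====
def Claim_equal_create_annotation_html : Prop := ∀ (text : String) (annotations : List String), Dom_create_annotation_html text annotations → Spec_create_annotation_html text annotations (create_annotation_html text annotations)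

-- ===== LEMMAS AND PROOFS =====

-- Replacing a single character c by `new` is a flatMap over the characters.
theorem replace_single_go (c : Char) (new : List Char) :
    ∀ (l acc : List Char) (fuel : Nat), l.length ≤ fuel →
      PySem.Chars.replace.go [c] new fuel l acc
        = acc.reverse ++ l.flatMap (fun x => if x = c then new else [x]) := by
  intro l
  induction l with
  | nil =>
    intro acc fuel _
    cases fuel <;> simp [PySem.Chars.replace.go]
  | cons c' t ih =>
    intro acc fuel hfuel
    cases fuel with
    | zero => simp at hfuel
    | succ fuel =>
      by_cases h : c' = c
      · subst h
        have hpre : List.isPrefixOf [c'] (c' :: t) = true := by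
          simp [List.isPrefixOf]
        simp only [PySem.Chars.replace.go, hpre, if_true, List.length_cons, List.length_nil,
          Nat.zero_add, List.drop_succ_cons, List.drop_zero] at *
        rw [ih (new.reverse ++ acc) fuel (by omega)]
        simp
      · have hpre : List.isPrefixOf [c] (c' :: t) = false := by
          simp [List.isPrefixOf]; exact fun hc => absurd hc.symm h
        simp only [PySem.Chars.replace.go, hpre, Bool.false_eq_true, if_false] at *
        rw [ih (c' :: acc) fuel (by simpa using Nat.succ_le_succ_iff.mp hfuel)]
        simp [h]

theorem replace_single (c : Char) (new s : List Char) :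
    PySem.Chars.replace s [c] new = s.flatMap (fun x => if x = c then new else [x]) := by
  unfold PySem.Chars.replace
  rw [if_neg (by simp)]
  rw [replace_single_go c new s [] s.length (le_refl _)]
  simp

-- The two successive single-character replaces of A equal B's one-shot
-- per-character escape (the output of the first replace contains no apostrophe).
theorem escape_elem (s : List Char) :
    (s.flatMap (fun x => if x = '"' then ("&quot;" : String).toList else [x])).flatMap
        (fun x => if x = '\'' then ("&apos;" : String).toList else [x])
      = pvEmitChars s := by
  induction s with
  | nil => simp [pvEmitChars]
  | cons c t ih =>
    simp only [List.flatMap_cons, List.flatMap_append, ih, pvEmitChars]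
    congr 1
    by_cases h : c = '"'
    · subst h; decide
    · rw [if_neg h]
      by_cases h' : c = '\''
      · subst h'; decide
      · simp [h, h']

-- A's join of the escaped elements equals B's outer streaming loop.
theorem join_emit_tail : ∀ (a : String) (rest : List String),
    PySem.Chars.join ['|'] ((a :: rest).map (fun s => pvEmitChars s.toList))
      = pvEmitChars a.toList ++ pvEmitAnns false rest := by
  intro a rest
  induction rest generalizing a with
  | nil => simp [pvEmitAnns, PySem.Chars.join_singleton]
  | cons b r ih =>
    simp only [List.map_cons] at *
    rw [PySem.Chars.join_cons_cons, ih b]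
    simp [pvEmitAnns]

theorem join_emit (annotations : List String) :
    PySem.Chars.join ['|']
        (annotations.map (fun a =>
          (a.toList.flatMap (fun x => if x = '"' then ("&quot;" : String).toList else [x])).flatMap
            (fun x => if x = '\'' then ("&apos;" : String).toList else [x])))
      = pvEmitAnns true annotations := by
  cases annotations with
  | nil => simp [pvEmitAnns, PySem.Chars.join_nil]
  | cons a rest =>
    have hmap : ∀ l : List String, l.map (fun a =>
        (a.toList.flatMap (fun x => if x = '"' then ("&quot;" : String).toList else [x])).flatMap
          (fun x => if x = '\'' then ("&apos;" : String).toList else [x]))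
        = l.map (fun s => pvEmitChars s.toList) := by
      intro l; exact List.map_congr_left (fun a _ => escape_elem a.toList)
    rw [hmap, join_emit_tail a rest]
    simp [pvEmitAnns]

-- ===== VERDICT (by name: the statement is the Claim_ definition above) =====
theorem create_annotation_html_spec : Claim_equal_create_annotation_html := by
  intro text annotations _
  unfold Spec_create_annotation_html create_annotation_html create_annotation_html_alt
  apply String.toList_inj.mp
  simp only [String.toList_append, PySem.Str.toList_join, List.map_map]
  have hq : ("\"" : String).toList = ['"'] := by decide
  have ha : ("'" : String).toList = ['\''] := by decide
  have : ∀ a : String,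
      (PySem.Str.replace (PySem.Str.replace a "\"" "&quot;") "'" "&apos;").toList
        = (a.toList.flatMap (fun x => if x = '"' then ("&quot;" : String).toList else [x])).flatMap
            (fun x => if x = '\'' then ("&apos;" : String).toList else [x]) := by
    intro a
    simp only [PySem.Str.toList_replace, hq, ha, replace_single]
  simp only [Function.comp_def, this]
  have hsep : ("|" : String).toList = ['|'] := by decide
  rw [hsep, join_emit]
  simp
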